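-- pv_equiv track=rewrite | github.com/Ryzhtus/master-thesis | ner/reader.py | __convert_to_document
-- ===== SOURCE A (Python) =====
-- def __convert_to_document(sentences: list, tags: list):
--     documents = []
--     documents_tags = []
--     document = []
--     document_tags = []
--
--     for sentence, tag in zip(sentences, tags):
--         if '-DOCSTART-' in sentence:
--             documents.append(document)
--             documents_tags.append(document_tags)
--             document = []
--             document_tags = []
--             document.append(sentence)
--             document_tags.append(tag)
--         else:
--             document.append(sentence)
--             document_tags.append(tag)
--
--     # append last document, because there is no '-DOCSTART-' or special end marker in text further
--     documents.append(document)
--     documents_tags.append(document_tags)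
--
--     return documents, documents_tags
-- ===== SOURCE B (Python) =====
-- def __convert_to_document(sentences: list, tags: list):
--     docs = _split(list(zip(sentences, tags)))
--     return ([[s for s, _ in d] for d in docs],
--             [[t for _, t in d] for d in docs])
--
-- def _split(pairs):
--     # build documents back-to-front: walk the pairs in reverse, a marker closes the current document
--     docs, doc = [], []
--     for pair in reversed(pairs):
--         doc.append(pair)
--         if '-DOCSTART-' in pair[0]:
--             doc.reverse()
--             docs.append(doc)
--             doc = []
--     doc.reverse()
--     docs.append(doc)
--     docs.reverse()
--     return docs
-- ===== Notes on version B (the rewrite author's own statement) =====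
-- stated objective: alternative
-- what changed: B zips once and builds the documents back-to-front in a single reverse pass (a marker closes the current document), then unzips, instead of A's forward loop over two parallel accumulators with a final flush.
import Mathlib
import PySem

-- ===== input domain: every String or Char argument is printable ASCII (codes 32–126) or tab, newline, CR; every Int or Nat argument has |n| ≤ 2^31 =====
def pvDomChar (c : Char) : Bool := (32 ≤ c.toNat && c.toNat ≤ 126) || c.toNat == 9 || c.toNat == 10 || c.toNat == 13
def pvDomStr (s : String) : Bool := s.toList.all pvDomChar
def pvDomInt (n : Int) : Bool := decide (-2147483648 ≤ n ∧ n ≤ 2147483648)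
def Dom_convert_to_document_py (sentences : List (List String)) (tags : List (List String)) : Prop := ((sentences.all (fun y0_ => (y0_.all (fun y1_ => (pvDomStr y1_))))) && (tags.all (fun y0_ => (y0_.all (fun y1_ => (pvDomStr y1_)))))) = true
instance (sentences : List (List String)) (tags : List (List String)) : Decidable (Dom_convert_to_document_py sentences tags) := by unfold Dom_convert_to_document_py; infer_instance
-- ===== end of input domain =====

-- B builds the documents back-to-front in one reverse pass over the zipped pairs, instead of A's
-- forward accumulator with a final flush; objective: alternative decomposition (return values only).

-- ===== PORT A =====
-- one loop step of A: state = (documents, documents_tags, document, document_tags)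
def pvStepA (st : List (List (List String)) × List (List (List String)) × List (List String) × List (List String))
    (pr : List String × List String) :
    List (List (List String)) × List (List (List String)) × List (List String) × List (List String) :=
  match st with
  | (docs, dtags, doc, dtag) =>
    if pr.1.contains "-DOCSTART-" then
      (docs ++ [doc], dtags ++ [dtag], ([] : List (List String)) ++ [pr.1], ([] : List (List String)) ++ [pr.2])
    else
      (docs, dtags, doc ++ [pr.1], dtag ++ [pr.2])

def convert_to_document_py (sentences : List (List String)) (tags : List (List String)) :
    List (List (List String)) × List (List (List String)) :=
  match (List.zip sentences tags).foldl pvStepA ([], [], [], []) with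
  | (docs, dtags, doc, dtag) => (docs ++ [doc], dtags ++ [dtag])

-- ===== PORT B =====
-- Source B's _split loop body: iterating over reversed(pairs) with state (docs, doc) is a foldr
def pvStepB (pr : List String × List String)
    (st : List (List (List String × List String)) × List (List String × List String)) :
    List (List (List String × List String)) × List (List String × List String) :=
  match st with
  | (docs, doc) =>
    let doc' := doc ++ [pr]
    if pr.1.contains "-DOCSTART-" then (docs ++ [doc'.reverse], []) else (docs, doc')

def pvSplit (pairs : List (List String × List String)) : List (List (List String × List String)) :=
  match pairs.foldr pvStepB ([], []) with
  | (docs, doc) => (docs ++ [doc.reverse]).reverse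

def convert_to_document_py_alt (sentences : List (List String)) (tags : List (List String)) :
    List (List (List String)) × List (List (List String)) :=
  let docs := pvSplit (List.zip sentences tags)
  (docs.map (fun d => d.map Prod.fst), docs.map (fun d => d.map Prod.snd))

-- ===== PRECONDITION & SPEC =====
def Spec_convert_to_document_py (sentences : List (List String)) (tags : List (List String)) (out : List (List (List String)) × List (List (List String))) : Prop := out = convert_to_document_py_alt sentences tags
instance (sentences : List (List String)) (tags : List (List String)) (out : List (List (List String)) × List (List (List String))) : Decidable (Spec_convert_to_document_py sentences tags out) := by unfold Spec_convert_to_document_py; infer_instance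

-- ===== CLAIM (what is proved, stated in full; the proofs are below) =====
def Claim_equal_convert_to_document_py : Prop := ∀ (sentences : List (List String)) (tags : List (List String)), Dom_convert_to_document_py sentences tags → Spec_convert_to_document_py sentences tags (convert_to_document_py sentences tags)

-- ===== LEMMAS AND PROOFS =====

-- proof-side reference: the recursive split both ports are shown to compute
def pvSplitRec (pairs : List (List String × List String)) : List (List (List String × List String)) :=
  match pairs with
  | [] => [[]]
  | p :: ps =>
    let sub := pvSplitRec ps
    if p.1.contains "-DOCSTART-" then [] :: (p :: sub.headD []) :: sub.tail
    else (p :: sub.headD []) :: sub.tail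

theorem pvSplitRec_ne_nil (ps : List (List String × List String)) : pvSplitRec ps ≠ [] := by
  cases ps with
  | nil => simp [pvSplitRec]
  | cons p ps => simp only [pvSplitRec]; split <;> simp

-- B's fold equals the recursive split
theorem pvSplit_eq_rec (ps : List (List String × List String)) : pvSplit ps = pvSplitRec ps := by
  induction ps with
  | nil => simp [pvSplit, pvSplitRec]
  | cons p ps ih =>
    simp only [pvSplit, List.foldr] at *
    rcases h : ps.foldr pvStepB ([], []) with ⟨D, d⟩
    rw [h] at ih
    simp only [pvStepB, pvSplitRec, ← ih]
    split <;> simp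

-- A's loop, flushed, equals the accumulators glued onto the recursive split
theorem pvStepA_glue (ps : List (List String × List String))
    (docs dtags : List (List (List String))) (doc dtag : List (List String)) :
    (let st := ps.foldl pvStepA (docs, dtags, doc, dtag)
     (st.1 ++ [st.2.2.1], st.2.1 ++ [st.2.2.2]))
    = (docs ++ (doc ++ ((pvSplitRec ps).headD []).map Prod.fst)
          :: ((pvSplitRec ps).tail.map (fun q => q.map Prod.fst)),
       dtags ++ (dtag ++ ((pvSplitRec ps).headD []).map Prod.snd)
          :: ((pvSplitRec ps).tail.map (fun q => q.map Prod.snd))) := by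
  induction ps generalizing docs dtags doc dtag with
  | nil => simp [pvSplitRec]
  | cons p ps ih =>
    simp only [List.foldl, pvStepA, pvSplitRec]
    split
    · rw [ih]
      rcases h : pvSplitRec ps with _ | ⟨q, qs⟩
      · exact absurd h (pvSplitRec_ne_nil ps)
      · simp
    · rw [ih]
      rcases h : pvSplitRec ps with _ | ⟨q, qs⟩
      · exact absurd h (pvSplitRec_ne_nil ps)
      · simp

-- ===== VERDICT (by name: the statement is the Claim_ definition above) =====
theorem convert_to_document_py_spec : Claim_equal_convert_to_document_py := by
  intro sentences tags _
  unfold Spec_convert_to_document_py convert_to_document_py convert_to_document_py_alt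
  rw [pvSplit_eq_rec]
  have h := pvStepA_glue (List.zip sentences tags) [] [] [] []
  rcases hf : (List.zip sentences tags).foldl pvStepA ([], [], [], []) with ⟨D, DT, d, dt⟩
  rw [hf] at h
  simp only at h
  rcases hs : pvSplitRec (List.zip sentences tags) with _ | ⟨q, qs⟩
  · exact absurd hs (pvSplitRec_ne_nil _)
  · rw [hs] at h
    simp at h ⊢
    exact ⟨h.1, h.2⟩
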